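-- pv_equiv track=rewrite | github.com/jyesselm/rna_lib_design | rna_lib_design/util.py | max_gc_stretch
-- ===== SOURCE A (Python) =====
-- def max_gc_stretch(s1, s2):
--     i = -1
--     j = len(s2)
--     max_count = 0
--     count = 0
--     while i < len(s1) - 1:
--         i += 1
--         j -= 1
--         flag = 0
--         if s1[i] == "G" and s2[j] == "C":
--             flag = 1
--         elif s1[i] == "C" and s2[j] == "G":
--             flag = 1
--         if flag:
--             count += 1
--             continue
--         else:
--             if count > max_count:
--                 max_count = count
--             count = 0
--     if count > max_count:
--         max_count = count
--     return max_count
-- ===== SOURCE B (Python) =====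
-- def max_gc_stretch(s1, s2):
--     n1, n2 = len(s1), len(s2)
--     comp = [
--         (s1[i] == "G" and s2[n2 - 1 - i] == "C")
--         or (s1[i] == "C" and s2[n2 - 1 - i] == "G")
--         for i in range(n1)
--     ]
--     bounds = [-1] + [i for i, c in enumerate(comp) if not c] + [n1]
--     return max(bounds[k + 1] - bounds[k] - 1 for k in range(len(bounds) - 1))
-- ===== Notes on version B (the rewrite author's own statement) =====
-- stated objective: alternative
-- what changed: A's single interleaved loop carrying flag/count/max_count with a continue is replaced by a build-then-scan decomposition: build the complementary-pair flag list, collect the positions of non-complementary pairs, and return the maximal gap between consecutive such positions (with sentinels -1 and len(s1)).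
import Mathlib
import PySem

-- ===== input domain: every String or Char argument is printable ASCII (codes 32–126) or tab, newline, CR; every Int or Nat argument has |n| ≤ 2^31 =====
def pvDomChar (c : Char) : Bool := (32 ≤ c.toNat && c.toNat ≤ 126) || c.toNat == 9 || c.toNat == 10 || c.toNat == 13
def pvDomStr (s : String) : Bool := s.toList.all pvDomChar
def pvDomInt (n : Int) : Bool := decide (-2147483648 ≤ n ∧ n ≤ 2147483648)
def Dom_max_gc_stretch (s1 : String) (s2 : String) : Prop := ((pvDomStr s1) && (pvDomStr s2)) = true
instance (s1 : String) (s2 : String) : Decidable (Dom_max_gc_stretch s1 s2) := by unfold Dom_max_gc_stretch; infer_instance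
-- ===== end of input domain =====

-- B replaces A's single interleaved flag/count/continue loop by a build-then-scan decomposition:
-- build the complementary-pair flag list, collect the non-complementary positions, and take the
-- maximal gap between consecutive such positions (objective: alternative; same asymptotic cost).


-- ===== PORT A =====
-- while loop of A: state (i, j, count, max_count); one fuel unit per iteration
-- (fuel = len(s1) exactly covers the iterations i = 0 .. len(s1)-1).
def gcLoop (l1 l2 : List Char) : Nat → Int → Int → Int → Int → Int
  | 0, _i, _j, count, maxc => if count > maxc then count else maxc
  | fuel+1, i, j, count, maxc =>
    if i < (l1.length : Int) - 1 then
      let i' := i + 1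
      let j' := j - 1
      let flag : Int :=
        if PySem.List.pyGet? l1 i' = some 'G' ∧ PySem.List.pyGet? l2 j' = some 'C' then 1
        else if PySem.List.pyGet? l1 i' = some 'C' ∧ PySem.List.pyGet? l2 j' = some 'G' then 1
        else 0
      if flag ≠ 0 then gcLoop l1 l2 fuel i' j' (count + 1) maxc
      else gcLoop l1 l2 fuel i' j' 0 (if count > maxc then count else maxc)
    else if count > maxc then count else maxc

def max_gc_stretch (s1 : String) (s2 : String) : Int :=
  gcLoop s1.toList s2.toList s1.toList.length (-1) (s2.toList.length : Int) 0 0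

-- ===== PORT B =====
def max_gc_stretch_alt (s1 : String) (s2 : String) : Int :=
  let l1 := s1.toList
  let l2 := s2.toList
  let comp : List Bool := (List.range l1.length).map (fun (i : Nat) =>
      (PySem.List.pyGet? l1 (i : Int) == some 'G'
         && PySem.List.pyGet? l2 ((l2.length : Int) - 1 - (i : Int)) == some 'C')
   || (PySem.List.pyGet? l1 (i : Int) == some 'C'
         && PySem.List.pyGet? l2 ((l2.length : Int) - 1 - (i : Int)) == some 'G'))
  let bounds : List Int :=
    -1 :: (((PySem.List.enumerate comp).filter (fun p => !p.2)).map (fun p => p.1) ++ [(l1.length : Int)])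
  let gaps : List Int := (List.range (bounds.length - 1)).map (fun (k : Nat) =>
      PySem.List.pyGetD bounds ((k : Int) + 1) 0 - PySem.List.pyGetD bounds ((k : Int)) 0 - 1)
  match PySem.List.max? gaps (fun x => x) with
  | some m => m
  | none => 0

-- ===== PRECONDITION & SPEC =====
-- Python A raises IndexError exactly when some position i ≥ 2*len(s2) of s1 holds 'G' or 'C'
-- (the `and` short-circuits, so s2[j] is only evaluated there); B raises identically; excluded.
def Pre_max_gc_stretch (s1 : String) (s2 : String) : Prop :=
  ((s1.toList.drop (2 * s2.toList.length)).all (fun c => !(c == 'G' || c == 'C'))) = true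
instance (s1 : String) (s2 : String) : Decidable (Pre_max_gc_stretch s1 s2) := by
  unfold Pre_max_gc_stretch; infer_instance

def pvWitness_max_gc_stretch : String × String := ("GC", "GC")

def Spec_max_gc_stretch (s1 : String) (s2 : String) (out : Int) : Prop := out = max_gc_stretch_alt s1 s2
instance (s1 : String) (s2 : String) (out : Int) : Decidable (Spec_max_gc_stretch s1 s2 out) := by unfold Spec_max_gc_stretch; infer_instance

-- ===== CLAIM (what is proved, stated in full; the proofs are below) =====
def Claim_equal_max_gc_stretch : Prop := ∀ (s1 : String) (s2 : String), Dom_max_gc_stretch s1 s2 → Pre_max_gc_stretch s1 s2 → Spec_max_gc_stretch s1 s2 (max_gc_stretch s1 s2)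

-- ===== LEMMAS AND PROOFS =====

-- the complementary-pair flag at position i (shared abstraction in the proofs;
-- syntactically the lambda of B's comp, provably A's branch test)
def fb (l1 l2 : List Char) (i : Nat) : Bool :=
  (PySem.List.pyGet? l1 (i : Int) == some 'G'
     && PySem.List.pyGet? l2 ((l2.length : Int) - 1 - (i : Int)) == some 'C')
  || (PySem.List.pyGet? l1 (i : Int) == some 'C'
     && PySem.List.pyGet? l2 ((l2.length : Int) - 1 - (i : Int)) == some 'G')

-- abstract form of A's loop over the flag sequence
def runFold : List Bool → Int → Int → Int
  | [], c, m => if c > m then c else m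
  | b :: bs, c, m => if b then runFold bs (c + 1) m else runFold bs 0 (if c > m then c else m)

-- lengths of the maximal runs of `true` (as split at the `false`s); always nonempty
def runsLens : List Bool → List Int
  | [] => [0]
  | true :: bs =>
    match runsLens bs with
    | [] => []
    | h :: t => (h + 1) :: t
  | false :: bs => 0 :: runsLens bs

-- structural form of B's adjacent-difference scan
def diffsRec : List Int → List Int
  | x :: y :: r => (y - x - 1) :: diffsRec (y :: r)
  | _ => []

-- positions of the `false` flags, indices starting at a
def falsesFrom (a : Int) : List Bool → List Int
  | [] => []
  | true :: bs => falsesFrom (a + 1) bs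
  | false :: bs => a :: falsesFrom (a + 1) bs

theorem runsLens_ne_nil (bs : List Bool) : runsLens bs ≠ [] := by
  induction bs with
  | nil => simp [runsLens]
  | cons b bs ih =>
    cases b <;> simp [runsLens]
    rcases h : runsLens bs with _ | ⟨h', t'⟩
    · exact absurd h ih
    · simp

theorem runsLens_nonneg (bs : List Bool) : ∀ x ∈ runsLens bs, 0 ≤ x := by
  induction bs with
  | nil => simp [runsLens]
  | cons b bs ih =>
    cases b
    · intro x hx
      simp only [runsLens] at hx
      rcases List.mem_cons.mp hx with h0 | hmem
      · omega
      · exact ih x hmem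
    · intro x hx
      rcases hr : runsLens bs with _ | ⟨h', t'⟩
      · exact absurd hr (runsLens_ne_nil bs)
      · simp only [runsLens, hr] at hx
        rcases List.mem_cons.mp hx with h0 | hmem
        · have := ih h' (by simp [hr]); omega
        · exact ih x (by simp [hr, hmem])

theorem runFold_eq (bs : List Bool) : ∀ (c m h : Int) (t : List Int),
    runsLens bs = h :: t → runFold bs c m = t.foldl max (max (c + h) m) := by
  induction bs with
  | nil =>
    intro c m h t hh
    simp only [runsLens] at hh
    injection hh with h1 h2
    subst h1; subst h2
    simp only [runFold, List.foldl]
    omega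
  | cons b bs ih =>
    intro c m h t hh
    cases b
    · -- false
      simp only [runsLens] at hh
      rcases hr : runsLens bs with _ | ⟨h', t'⟩
      · exact absurd hr (runsLens_ne_nil bs)
      · injection hh with h1 h2
        subst h1
        rw [hr] at h2; subst h2
        simp only [runFold, Bool.false_eq_true, if_false]
        rw [ih 0 (if c > m then c else m) h' t' hr]
        simp only [List.foldl]
        congr 1
        omega
    · -- true
      simp only [runsLens] at hh
      rcases hr : runsLens bs with _ | ⟨h', t'⟩
      · exact absurd hr (runsLens_ne_nil bs)
      · rw [hr] at hh
        injection hh with h1 h2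
        subst h1; subst h2
        simp only [runFold, if_true]
        rw [ih (c + 1) m h' t' hr]
        congr 1
        omega

theorem gcLoop_eq (l1 l2 : List Char) : ∀ (fuel s : Nat) (c m : Int), s + fuel = l1.length →
    gcLoop l1 l2 fuel ((s : Int) - 1) ((l2.length : Int) - (s : Int)) c m
      = runFold ((List.range' s fuel).map (fb l1 l2)) c m := by
  intro fuel
  induction fuel with
  | zero => intro s c m _; simp [gcLoop, runFold]
  | succ fuel ih =>
    intro s c m hs
    have hcond : (s : Int) - 1 < (l1.length : Int) - 1 := by omega
    rw [List.range'_succ, List.map_cons]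
    simp only [gcLoop, if_pos hcond]
    have hs' : (s + 1) + fuel = l1.length := by omega
    have hflag :
        ((if PySem.List.pyGet? l1 (((s : Int) - 1) + 1) = some 'G' ∧
              PySem.List.pyGet? l2 (((l2.length : Int) - (s : Int)) - 1) = some 'C' then (1 : Int)
         else if PySem.List.pyGet? l1 (((s : Int) - 1) + 1) = some 'C' ∧
              PySem.List.pyGet? l2 (((l2.length : Int) - (s : Int)) - 1) = some 'G' then 1
         else 0) ≠ 0) ↔ fb l1 l2 s = true := by
      have hi : ((s : Int) - 1) + 1 = (s : Int) := by omega
      have hj' : ((l2.length : Int) - (s : Int)) - 1 = (l2.length : Int) - 1 - (s : Int) := by omega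
      rw [hi, hj']
      unfold fb
      simp only [Bool.or_eq_true, Bool.and_eq_true, beq_iff_eq]
      split_ifs with h1 h2
      · simp [h1]
      · simp [h2]
      · exact ⟨fun hn => absurd rfl hn,
          fun h => by rcases h with h | h; exacts [absurd h h1, absurd h h2]⟩
    have e1 : ((s : Int) - 1) + 1 = ((s + 1 : Nat) : Int) - 1 := by push_cast; ring
    have e2 : ((l2.length : Int) - (s : Int)) - 1 = (l2.length : Int) - ((s + 1 : Nat) : Int) := by
      push_cast; ring
    cases hb : fb l1 l2 s with
    | false =>
      rw [if_neg (by rw [hflag, hb]; simp), e1, e2,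
          ih (s + 1) 0 (if c > m then c else m) hs']
      simp [runFold]
    | true =>
      rw [if_pos (by rw [hflag]; exact hb), e1, e2, ih (s + 1) (c + 1) m hs']
      simp [runFold]

theorem enum_filter_eq (bs : List Bool) : ∀ a : Int,
    ((PySem.List.enumerate bs a).filter (fun p => !p.2)).map (fun p => p.1) = falsesFrom a bs := by
  induction bs with
  | nil => intro a; simp [PySem.List.enumerate, falsesFrom]
  | cons b bs ih =>
    intro a
    cases b <;> simp [PySem.List.enumerate, falsesFrom, ih]

theorem gaps_eq_diffsRec : ∀ xs : List Int,
    (List.range (xs.length - 1)).map (fun (k : Nat) =>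
        PySem.List.pyGetD xs ((k : Int) + 1) 0 - PySem.List.pyGetD xs ((k : Int)) 0 - 1)
      = diffsRec xs := by
  intro xs
  rcases xs with _ | ⟨x, xs⟩
  · simp [diffsRec]
  · induction xs generalizing x with
    | nil => simp [diffsRec]
    | cons y r ih =>
      have hlen : (x :: y :: r).length - 1 = ((y :: r).length - 1) + 1 := by simp
      rw [hlen, List.range_succ_eq_map, List.map_cons, List.map_map]
      simp only [diffsRec]
      congr 1
      · have h0 : PySem.List.pyGetD (x :: y :: r) (((0 : Nat) : Int)) 0 = x := by
          rw [PySem.List.pyGetD_natCast]; rfl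
        have h1 : PySem.List.pyGetD (x :: y :: r) (((0 : Nat) : Int) + 1) 0 = y := by
          have e : (((0 : Nat) : Int) + 1) = ((1 : Nat) : Int) := by omega
          rw [e, PySem.List.pyGetD_natCast]; rfl
        rw [h0, h1]
      · rw [← ih y]
        apply List.map_congr_left
        intro k _
        simp only [Function.comp]
        have e1 : ((Nat.succ k : Nat) : Int) = ((k + 1 : Nat) : Int) := rfl
        have e2 : ((Nat.succ k : Nat) : Int) + 1 = ((k + 2 : Nat) : Int) := by omega
        have e3 : ((k : Int) + 1) = ((k + 1 : Nat) : Int) := by omega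
        rw [e1, e2, e3, PySem.List.pyGetD_natCast, PySem.List.pyGetD_natCast,
            PySem.List.pyGetD_natCast, PySem.List.pyGetD_natCast]
        simp

theorem diffs_falses (bs : List Bool) : ∀ a : Int,
    diffsRec (a :: (falsesFrom (a + 1) bs ++ [a + 1 + (bs.length : Int)])) = runsLens bs := by
  induction bs with
  | nil => intro a; simp [falsesFrom, diffsRec, runsLens]
  | cons b bs ih =>
    intro a
    have harith : a + 1 + (((b :: bs).length : Nat) : Int) = (a + 1) + 1 + (bs.length : Int) := by
      simp only [List.length_cons]; push_cast; ring
    cases b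
    · -- false head
      simp only [falsesFrom, List.cons_append]
      rw [harith]
      simp only [diffsRec]
      rw [ih (a + 1)]
      simp only [runsLens]
      congr 1
      omega
    · -- true head
      simp only [falsesFrom]
      rw [harith]
      have hne : falsesFrom (a + 1 + 1) bs ++ [(a + 1) + 1 + (bs.length : Int)] ≠ [] := by simp
      rcases List.exists_cons_of_ne_nil hne with ⟨y, r, hyr⟩
      rw [hyr]
      simp only [diffsRec]
      have hih := ih (a + 1)
      rw [hyr] at hih
      simp only [diffsRec] at hih
      have : runsLens (true :: bs) = (y - (a + 1) - 1 + 1) :: diffsRec (y :: r) := by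
        simp only [runsLens, ← hih]
      rw [this]
      congr 1
      omega

theorem max_gc_stretch_eq (s1 s2 : String) : max_gc_stretch s1 s2 = max_gc_stretch_alt s1 s2 := by
  unfold max_gc_stretch max_gc_stretch_alt
  dsimp only
  set l1 := s1.toList with hl1
  set l2 := s2.toList with hl2
  -- A side
  have hA : gcLoop l1 l2 l1.length (-1) (l2.length : Int) 0 0
      = runFold ((List.range l1.length).map (fb l1 l2)) 0 0 := by
    have h0 := gcLoop_eq l1 l2 l1.length 0 0 0 (by omega)
    rw [← List.range_eq_range'] at h0
    norm_num at h0
    exact h0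
  rw [hA]
  -- B side: comp is exactly the flag list
  have hcomp : (List.range l1.length).map (fun (i : Nat) =>
      (PySem.List.pyGet? l1 (i : Int) == some 'G'
         && PySem.List.pyGet? l2 ((l2.length : Int) - 1 - (i : Int)) == some 'C')
   || (PySem.List.pyGet? l1 (i : Int) == some 'C'
         && PySem.List.pyGet? l2 ((l2.length : Int) - 1 - (i : Int)) == some 'G'))
      = (List.range l1.length).map (fb l1 l2) := rfl
  rw [hcomp]
  set flags := (List.range l1.length).map (fb l1 l2) with hflags
  have hlen : flags.length = l1.length := by simp [hflags]
  rw [enum_filter_eq flags 0]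
  have hb : (-1 : Int) :: (falsesFrom 0 flags ++ [(l1.length : Int)])
      = (-1 : Int) :: (falsesFrom ((-1) + 1) flags ++ [(-1) + 1 + (flags.length : Int)]) := by
    rw [hlen]; norm_num
  rw [hb, gaps_eq_diffsRec, diffs_falses flags (-1)]
  rcases hr : runsLens flags with _ | ⟨h, t⟩
  · exact absurd hr (runsLens_ne_nil flags)
  · rw [runFold_eq flags 0 0 h t hr, PySem.List.max?_id_cons]
    have hh : 0 ≤ h := runsLens_nonneg flags h (by simp [hr])
    have hmax : max (0 + h) 0 = h := by omega
    rw [hmax]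

-- ===== VERDICT (by name: the statement is the Claim_ definition above) =====
theorem max_gc_stretch_spec : Claim_equal_max_gc_stretch := by
  intro s1 s2 _ _
  unfold Spec_max_gc_stretch
  exact max_gc_stretch_eq s1 s2
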